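-- pv_equiv track=rewrite | github.com/schlebachlab/PRF-Search | Statistical Analysis/enhanced_harrington_search_v84_one_hept_stats_first_set.py | bin_transcripts_by_gene_id
-- ===== SOURCE A (Python) =====
-- def bin_transcripts_by_gene_id(filtered_list):
--     """
--     Bins Ensembl transcripts by their shared Ensembl Gene ID.
--
--     Parameters:
--     filtered_list (list): List of parsed and filtered Ensembl transcripts.
--
--     Returns:
--     dict: Dictionary where keys are Ensembl Gene IDs and values are lists of transcripts associated with that Gene ID.
--     """
--     binned_dict = {}
--
--     # Iterate through the filtered_list and bin by ensembl_gene_id (which is the first item in each entry)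
--     for entry in filtered_list:
--         ensembl_gene_id = entry[0]  # Assuming the Ensembl Gene ID is at index 0
--
--         if ensembl_gene_id not in binned_dict:
--             binned_dict[ensembl_gene_id] = []
--
--         # Append the transcript entry to the list of transcripts for this gene
--         binned_dict[ensembl_gene_id].append(entry)
--
--     return binned_dict
-- ===== SOURCE B (Python) =====
-- def bin_transcripts_by_gene_id(filtered_list):
--     """
--     Bins Ensembl transcripts by their shared Ensembl Gene ID.
--
--     Two passes: collect the distinct gene IDs in order of first occurrence,
--     then gather each gene's transcripts with a filter comprehension.
--     """
--     gene_ids = list(dict.fromkeys(entry[0] for entry in filtered_list))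
--     return {gid: [entry for entry in filtered_list if entry[0] == gid]
--             for gid in gene_ids}
-- ===== Notes on version B (the rewrite author's own statement) =====
-- stated objective: simpler
-- what changed: Replaced A's single forward pass mutating a dict (membership test, seed with [], append) by a two-pass comprehension: dedupe the gene IDs with dict.fromkeys, then build each group with a filter over the whole list; Pre_ excludes only lists containing an empty entry, on which A's entry[0] raises IndexError.
import Mathlib
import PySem

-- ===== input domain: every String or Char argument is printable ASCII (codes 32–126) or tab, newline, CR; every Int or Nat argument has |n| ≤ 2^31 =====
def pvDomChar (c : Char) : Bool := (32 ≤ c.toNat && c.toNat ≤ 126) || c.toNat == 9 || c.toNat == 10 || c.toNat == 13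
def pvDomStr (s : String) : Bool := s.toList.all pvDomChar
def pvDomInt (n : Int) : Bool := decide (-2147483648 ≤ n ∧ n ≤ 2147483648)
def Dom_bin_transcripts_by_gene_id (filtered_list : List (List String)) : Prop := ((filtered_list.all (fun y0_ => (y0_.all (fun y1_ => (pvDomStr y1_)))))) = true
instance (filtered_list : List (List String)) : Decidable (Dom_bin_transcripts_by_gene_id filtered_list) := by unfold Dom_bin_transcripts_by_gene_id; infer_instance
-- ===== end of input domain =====

-- B replaces A's single-pass dict mutation by a two-pass comprehension (dedupe gene IDs,
-- then filter the list per gene); objective: simpler — same result, shorter code.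

-- ===== PORT A =====
def bin_transcripts_by_gene_id (filtered_list : List (List String)) : List (String × List (List String)) :=
  (filtered_list.foldl
    (fun binned_dict entry =>
      -- entry[0]; Pre_ guarantees entry ≠ [], so pyGet? is some and the default is never used
      let ensembl_gene_id := (PySem.List.pyGet? entry 0).getD ""
      let binned_dict :=
        if binned_dict.contains ensembl_gene_id then binned_dict
        else binned_dict.insert ensembl_gene_id []
      binned_dict.modify ensembl_gene_id [] (fun g => g ++ [entry]))
    PySem.Dict.empty).items

-- ===== PORT B =====
-- list(dict.fromkeys(entry[0] for entry in filtered_list)): the distinct keys in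
-- first-occurrence order = PySem.Set.ofList; then a filter comprehension per key.
def bin_transcripts_by_gene_id_alt (filtered_list : List (List String)) : List (String × List (List String)) :=
  let gene_ids := PySem.Set.ofList (filtered_list.map (fun entry => (PySem.List.pyGet? entry 0).getD ""))
  gene_ids.map (fun gid =>
    (gid, filtered_list.filter (fun entry => ((PySem.List.pyGet? entry 0).getD "") == gid)))

-- ===== PRECONDITION & SPEC =====
-- Pre_ excludes only lists containing an empty entry, on which A's 'entry[0]' raises IndexError.
def Pre_bin_transcripts_by_gene_id (filtered_list : List (List String)) : Prop :=
  ∀ e ∈ filtered_list, e ≠ []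
instance (filtered_list : List (List String)) : Decidable (Pre_bin_transcripts_by_gene_id filtered_list) := by unfold Pre_bin_transcripts_by_gene_id; infer_instance

def pvWitness_bin_transcripts_by_gene_id : List (List String) :=
  [["g1", "t1"], ["g2", "t2"], ["g1", "t3"]]

def Spec_bin_transcripts_by_gene_id (filtered_list : List (List String)) (out : List (String × List (List String))) : Prop := out = bin_transcripts_by_gene_id_alt filtered_list
instance (filtered_list : List (List String)) (out : List (String × List (List String))) : Decidable (Spec_bin_transcripts_by_gene_id filtered_list out) := by unfold Spec_bin_transcripts_by_gene_id; infer_instance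

-- ===== CLAIM (what is proved, stated in full; the proofs are below) =====
def Claim_equal_bin_transcripts_by_gene_id : Prop := ∀ (filtered_list : List (List String)), Dom_bin_transcripts_by_gene_id filtered_list → Pre_bin_transcripts_by_gene_id filtered_list → Spec_bin_transcripts_by_gene_id filtered_list (bin_transcripts_by_gene_id filtered_list)

-- ===== LEMMAS AND PROOFS =====

-- the key both ports extract from an entry
def pvKey (e : List String) : String := (PySem.List.pyGet? e 0).getD ""

theorem pv_stepA_eq (d : PySem.Dict String (List (List String))) (e : List String) :
    (if d.contains (pvKey e) then d else d.insert (pvKey e) []).modify (pvKey e) [] (fun g => g ++ [e])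
      = d.modify (pvKey e) [] (fun g => g ++ [e]) := by
  by_cases h : d.contains (pvKey e)
  · rw [if_pos h]
  · rw [if_neg h]
    unfold PySem.Dict.modify
    rw [PySem.Dict.getD_insert_self, PySem.Dict.insert_insert_self,
        PySem.Dict.getD_of_not_contains d [] (by simpa using h)]

theorem pv_A_eq_alt (l : List (List String)) :
    bin_transcripts_by_gene_id l = bin_transcripts_by_gene_id_alt l := by
  unfold bin_transcripts_by_gene_id
  have hstep : (fun (binned_dict : PySem.Dict String (List (List String))) (entry : List String) =>
        let ensembl_gene_id := (PySem.List.pyGet? entry 0).getD ""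
        let binned_dict :=
          if binned_dict.contains ensembl_gene_id then binned_dict
          else binned_dict.insert ensembl_gene_id []
        binned_dict.modify ensembl_gene_id [] (fun g => g ++ [entry]))
      = fun d e => d.modify (pvKey e) [] (fun g => g ++ [e]) := by
    funext d e
    exact pv_stepA_eq d e
  rw [hstep]
  set D := l.foldl (fun d e => d.modify (pvKey e) [] (fun g => g ++ [e])) PySem.Dict.empty with hD
  have hkeys : D.keys = PySem.Set.ofList (l.map pvKey) := by
    rw [hD, PySem.Dict.keys_foldl_modify_key l pvKey [] (fun _ e g => g ++ [e]) PySem.Dict.empty]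
    rw [PySem.Dict.keys_empty]
    rfl
  have hnd : D.keys.Nodup := by
    rw [hD]
    exact PySem.Dict.nodup_keys_foldl_modify_key l pvKey [] (fun _ e g => g ++ [e])
      PySem.Dict.empty (by simp [PySem.Dict.keys_empty])
  have hgetD : ∀ c, D.getD c [] = l.filter (fun e => pvKey e == c) := by
    intro c
    have hmap : D = (l.map (fun e => (pvKey e, e))).foldl
        (fun d p => d.modify p.1 [] (fun g => g ++ [p.2])) PySem.Dict.empty := by
      rw [hD, List.foldl_map]
    rw [hmap, PySem.Dict.getD_foldl_modify_append]
    simp [List.filter_map, Function.comp_def]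
  rw [PySem.Dict.items_eq_map_keys D hnd [], hkeys]
  unfold bin_transcripts_by_gene_id_alt
  apply List.map_congr_left
  intro k _
  rw [hgetD k]; rfl

-- ===== VERDICT (by name: the statement is the Claim_ definition above) =====
theorem bin_transcripts_by_gene_id_spec : Claim_equal_bin_transcripts_by_gene_id := by
  intro l _ _
  unfold Spec_bin_transcripts_by_gene_id
  exact pv_A_eq_alt l
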